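-- pv_equiv track=rewrite | github.com/Hayden-Miller-165/Mission-Planning-Automation-Project | weather_forecast.py | WeatherRules
-- ===== SOURCE A (Python) =====
-- def WeatherRules(weather):
--     condition = ''
--     for item in weather:
--         if (item[:3] == 'OVC' or item[:3] == 'BKN') and (int(item[3:6]) <= 15):
--             return 'Red'
--         elif (item[:3] == 'OVC' or item[:3] == 'BKN') and (int(item[3:6]) <= 25):
--             condition = 'Yellow'
--         else:
--             condition = 'Green'
--     return condition
-- ===== SOURCE B (Python) =====
-- def WeatherRules(weather):
--     def ceiling(item):
--         # cloud base for OVC/BKN layers, None for anything else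
--         return int(item[3:6]) if item[:3] in ('OVC', 'BKN') else None
--
--     # pass 1: any red layer anywhere wins immediately
--     for item in weather:
--         c = ceiling(item)
--         if c is not None and c <= 15:
--             return 'Red'
--     # otherwise the verdict is decided by the last entry alone
--     if not weather:
--         return ''
--     c = ceiling(weather[-1])
--     return 'Yellow' if c is not None and c <= 25 else 'Green'
-- ===== Notes on version B (the rewrite author's own statement) =====
-- stated objective: simpler
-- what changed: Replaces the per-iteration condition accumulator with a red-scan that returns 'Red' on the first low OVC/BKN layer, then classifies only the last element (Yellow/Green), since A's accumulator is always overwritten and only its final value matters.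
import Mathlib
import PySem

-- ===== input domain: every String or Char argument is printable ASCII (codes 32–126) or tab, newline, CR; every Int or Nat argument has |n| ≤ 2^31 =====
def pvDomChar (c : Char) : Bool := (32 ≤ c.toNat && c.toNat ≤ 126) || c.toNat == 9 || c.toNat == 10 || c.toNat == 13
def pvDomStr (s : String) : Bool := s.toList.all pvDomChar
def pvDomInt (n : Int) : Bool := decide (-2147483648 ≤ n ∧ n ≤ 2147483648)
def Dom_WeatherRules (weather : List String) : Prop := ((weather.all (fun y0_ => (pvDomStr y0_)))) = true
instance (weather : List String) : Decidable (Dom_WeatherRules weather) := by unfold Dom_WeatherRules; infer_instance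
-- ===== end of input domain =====

-- B replaces A's per-iteration condition accumulator with a red-scan plus a
-- classification of the last element only (simpler decomposition, same cost).


-- shared pure helpers on the input (used by both ports and by Pre_)
-- item[:3] == 'OVC' or item[:3] == 'BKN'
def pvPrefCB (cs : List Char) : Bool :=
  PySem.List.slice cs none (some 3) == "OVC".toList
    || PySem.List.slice cs none (some 3) == "BKN".toList

-- int(item[3:6]) ; none = ValueError
def pvNum? (cs : List Char) : Option Int :=
  PySem.Int.ofChars? (PySem.List.slice cs (some 3) (some 6))

-- ===== PORT A =====
def WeatherRulesLoop : List String → String → String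
  | [], cond => cond
  | item :: rest, cond =>
    if pvPrefCB item.toList then
      match pvNum? item.toList with
      | none => ""            -- int() raises ValueError here; excluded by Pre_
      | some n =>
        if n ≤ 15 then "Red"
        else if n ≤ 25 then WeatherRulesLoop rest "Yellow"
        else WeatherRulesLoop rest "Green"
    else WeatherRulesLoop rest "Green"

def WeatherRules (weather : List String) : String :=
  WeatherRulesLoop weather ""

-- ===== PORT B =====
-- B's ceiling(item); the ValueError inside int() is collapsed to none (that
-- case is exactly where B raises, excluded by Pre_)
def pvCeil? (cs : List Char) : Option Int :=
  if pvPrefCB cs then pvNum? cs else none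

-- B's first pass: 'return Red' on the first low OVC/BKN layer
def WeatherRulesAnyRed : List String → Bool
  | [] => false
  | item :: rest =>
    match pvCeil? item.toList with
    | some n => if n ≤ 15 then true else WeatherRulesAnyRed rest
    | none => WeatherRulesAnyRed rest

def WeatherRules_alt (weather : List String) : String :=
  if WeatherRulesAnyRed weather then "Red"
  else
    match weather.getLast? with
    | none => ""
    | some item =>
      match pvCeil? item.toList with
      | some n => if n ≤ 25 then "Yellow" else "Green"
      | none => "Green"

-- ===== PRECONDITION & SPEC =====
def pvBad (s : String) : Bool := pvPrefCB s.toList && (pvNum? s.toList).isNone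
def pvRedB (s : String) : Bool :=
  pvPrefCB s.toList && ((pvNum? s.toList).elim false (· ≤ 15))

-- Pre_ excludes exactly the inputs on which A (and B alike) raises ValueError:
-- an OVC/BKN item whose characters 3..6 are not an int literal, with no
-- red item (OVC/BKN ≤ 15) strictly before it.
def Pre_WeatherRules (weather : List String) : Prop :=
  ∀ i < weather.length,
    pvBad (weather.getD i "") = true → ∃ j < i, pvRedB (weather.getD j "") = true
instance (weather : List String) : Decidable (Pre_WeatherRules weather) := by
  unfold Pre_WeatherRules; infer_instance

def pvWitness_WeatherRules : List String := ["OVC030", "SKC", "BKN020"]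

def Spec_WeatherRules (weather : List String) (out : String) : Prop := out = WeatherRules_alt weather
instance (weather : List String) (out : String) : Decidable (Spec_WeatherRules weather out) := by unfold Spec_WeatherRules; infer_instance

-- ===== CLAIM (what is proved, stated in full; the proofs are below) =====
def Claim_equal_WeatherRules : Prop := ∀ (weather : List String), Dom_WeatherRules weather → Pre_WeatherRules weather → Spec_WeatherRules weather (WeatherRules weather)

-- ===== LEMMAS AND PROOFS =====

-- classification of the last surviving item, common normal form of both ports
def pvClassify (s : String) : String :=
  if pvPrefCB s.toList && ((pvNum? s.toList).elim false (· ≤ 25)) then "Yellow" else "Green"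

lemma anyRed_eq (w : List String) : WeatherRulesAnyRed w = w.any pvRedB := by
  induction w with
  | nil => rfl
  | cons item rest ih =>
    simp only [WeatherRulesAnyRed, List.any_cons, pvCeil?, pvRedB]
    cases hp : pvPrefCB item.toList with
    | false => simp [ih]
    | true =>
      cases hn : pvNum? item.toList with
      | none => simp [ih, Option.elim]
      | some n =>
        by_cases h15 : n ≤ 15 <;> simp [h15, ih, Option.elim]

lemma restPre (item : String) (rest : List String)
    (hpre : Pre_WeatherRules (item :: rest)) (hred : pvRedB item = false) :
    Pre_WeatherRules rest := by
  intro i hi hbad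
  have h := hpre (i + 1) (by simpa using Nat.succ_lt_succ hi) (by simpa using hbad)
  obtain ⟨j, hj, hredj⟩ := h
  cases j with
  | zero => simp at hredj; rw [hredj] at hred; exact absurd hred (by simp)
  | succ k =>
    exact ⟨k, by omega, by simpa using hredj⟩

lemma loopA_normal (w : List String) (hpre : Pre_WeatherRules w) (cond : String) :
    WeatherRulesLoop w cond =
      if w.any pvRedB then "Red"
      else match w.getLast? with
        | none => cond
        | some it => pvClassify it := by
  induction w generalizing cond with
  | nil => rfl
  | cons item rest ih =>
    by_cases hred : pvRedB item = true
    · -- head is red: A returns 'Red' immediately, any = true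
      obtain ⟨hp, hn⟩ := Bool.and_eq_true_iff.mp (by simpa [pvRedB] using hred)
      cases hnum : pvNum? item.toList with
      | none => rw [hnum] at hn; simp [Option.elim] at hn
      | some n =>
        rw [hnum] at hn
        simp only [Option.elim] at hn
        have h15 : n ≤ 15 := by simpa using hn
        simp [WeatherRulesLoop, hp, hnum, h15, List.any_cons, hred]
    · -- head is not red
      have hred' : pvRedB item = false := by simpa using hred
      have hnotbad : pvBad item = false := by
        by_contra hb
        have hb' : pvBad item = true := by simpa using hb
        obtain ⟨j, hj, _⟩ := hpre 0 (by simp) (by simpa using hb')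
        omega
      have hrest := restPre item rest hpre hred'
      have hstep : WeatherRulesLoop (item :: rest) cond =
          WeatherRulesLoop rest (pvClassify item) := by
        simp only [WeatherRulesLoop, pvClassify]
        cases hp : pvPrefCB item.toList with
        | false => simp
        | true =>
          cases hnum : pvNum? item.toList with
          | none =>
            exfalso
            have : pvBad item = true := by simp [pvBad, hp, hnum]
            rw [this] at hnotbad; simp at hnotbad
          | some n =>
            have h15 : ¬ n ≤ 15 := by
              intro h
              have : pvRedB item = true := by simp [pvRedB, hp, hnum, Option.elim, h]
              rw [this] at hred'; simp at hred'
            by_cases h25 : n ≤ 25 <;> simp [h15, h25, Option.elim]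
      rw [hstep, ih hrest]
      have hany : (item :: rest).any pvRedB = rest.any pvRedB := by
        simp [List.any_cons, hred']
      rw [hany]
      cases hl : rest.getLast? with
      | none =>
        have : rest = [] := List.getLast?_eq_none_iff.mp hl
        subst this; simp
      | some y =>
        have h2 : (item :: rest).getLast? = some y := by
          cases rest with
          | nil => simp at hl
          | cons r rs => rw [List.getLast?_cons_cons]; exact hl
        simp [h2]

lemma altB_normal (w : List String) :
    WeatherRules_alt w =
      if w.any pvRedB then "Red"
      else match w.getLast? with
        | none => ""
        | some it => pvClassify it := by
  unfold WeatherRules_alt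
  rw [anyRed_eq]
  cases hany : w.any pvRedB with
  | true => simp
  | false =>
    simp only [Bool.false_eq_true, if_false]
    cases hl : w.getLast? with
    | none => rfl
    | some it =>
      simp only [pvClassify, pvCeil?]
      cases hp : pvPrefCB it.toList with
      | false => simp
      | true =>
        cases hn : pvNum? it.toList with
        | none => simp [Option.elim]
        | some n => by_cases h25 : n ≤ 25 <;> simp [h25, Option.elim]

-- ===== VERDICT (by name: the statement is the Claim_ definition above) =====
theorem WeatherRules_spec : Claim_equal_WeatherRules := by
  intro w _ hpre
  unfold Spec_WeatherRules WeatherRules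
  rw [loopA_normal w hpre "", altB_normal w]
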